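-- pv_equiv track=rewrite | github.com/enicaise/kodi-addon-project | script.program.mysqlassistant/resources/lib/db_checker.py | _expected_versions_for
-- ===== SOURCE A (Python) =====
-- from typing import Any, Dict, List, Optional
--
-- KODI_DB_VERSION_MAP: Dict[int, Dict[str, str]] = {
--     21: {"MyVideos": "122", "MyMusic": "84"},
--     20: {"MyVideos": "121", "MyMusic": "82"},
--     19: {"MyVideos": "119", "MyMusic": "82"},
--     18: {"MyVideos": "116", "MyMusic": "72"},
--     17: {"MyVideos": "107", "MyMusic": "60"},
-- }
--
-- def _expected_versions_for(major: Optional[int]) -> Dict[str, str]: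
--     if not KODI_DB_VERSION_MAP:
--         return {}
--     sorted_majors = sorted(KODI_DB_VERSION_MAP.keys())
--     if major is None:
--         chosen = sorted_majors[-1]
--     else:
--         chosen = sorted_majors[0]
--         for candidate in sorted_majors:
--             if major >= candidate:
--                 chosen = candidate
--             else:
--                 break
--         if major >= sorted_majors[-1]:
--             chosen = sorted_majors[-1]
--     return dict(KODI_DB_VERSION_MAP.get(chosen, {}))
-- ===== SOURCE B (Python) =====
-- from typing import Any, Dict, List, Optional
--
-- KODI_DB_VERSION_MAP: Dict[int, Dict[str, str]] = {
--     21: {"MyVideos": "122", "MyMusic": "84"},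
--     20: {"MyVideos": "121", "MyMusic": "82"},
--     19: {"MyVideos": "119", "MyMusic": "82"},
--     18: {"MyVideos": "116", "MyMusic": "72"},
--     17: {"MyVideos": "107", "MyMusic": "60"},
-- }
--
-- def _expected_versions_for(major: Optional[int]) -> Dict[str, str]:
--     if not KODI_DB_VERSION_MAP:
--         return {}
--     sorted_majors = sorted(KODI_DB_VERSION_MAP.keys())
--     if major is None:
--         chosen = sorted_majors[-1]
--     else:
--         # binary search: lo = number of keys <= major (bisect_right)
--         lo, hi = 0, len(sorted_majors)
--         while lo < hi:
--             mid = (lo + hi) // 2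
--             if sorted_majors[mid] <= major:
--                 lo = mid + 1
--             else:
--                 hi = mid
--         chosen = sorted_majors[max(lo - 1, 0)]
--     return dict(KODI_DB_VERSION_MAP.get(chosen, {}))
-- ===== Notes on version B (the rewrite author's own statement) =====
-- stated objective: alternative
-- what changed: A's linear scan-with-break over the sorted keys (plus a redundant final clamp to the largest key) is replaced by a hand-written bisect_right binary search picking sorted_majors[max(idx-1,0)].
import Mathlib
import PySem

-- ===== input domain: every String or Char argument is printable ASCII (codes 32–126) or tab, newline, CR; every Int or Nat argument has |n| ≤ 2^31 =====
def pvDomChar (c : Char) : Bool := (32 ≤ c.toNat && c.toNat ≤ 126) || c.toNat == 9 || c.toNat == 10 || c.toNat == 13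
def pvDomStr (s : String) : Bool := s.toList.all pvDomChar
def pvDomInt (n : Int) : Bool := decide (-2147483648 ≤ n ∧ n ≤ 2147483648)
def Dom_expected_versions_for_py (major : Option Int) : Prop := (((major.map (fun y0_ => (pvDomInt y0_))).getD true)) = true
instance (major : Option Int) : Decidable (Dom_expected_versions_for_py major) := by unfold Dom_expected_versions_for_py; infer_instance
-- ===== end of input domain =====

-- B replaces A's linear scan-with-break (plus redundant final clamp) by a binary search for
-- the rightmost key ≤ major; objective: alternative (the map is a small constant, so no speed claim).

-- ===== PORT A =====
-- module constant KODI_DB_VERSION_MAP, as an insertion-ordered association list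
def kodiDbVersionMap : List (Int × List (String × String)) :=
  [(21, [("MyVideos", "122"), ("MyMusic", "84")]),
   (20, [("MyVideos", "121"), ("MyMusic", "82")]),
   (19, [("MyVideos", "119"), ("MyMusic", "82")]),
   (18, [("MyVideos", "116"), ("MyMusic", "72")]),
   (17, [("MyVideos", "107"), ("MyMusic", "60")])]

-- KODI_DB_VERSION_MAP.get(k, {}) : first-match lookup with default {}
def kodiMapGetD (m : List (Int × List (String × String))) (k : Int) : List (String × String) :=
  match m with
  | [] => []
  | (k', v) :: rest => if k' = k then v else kodiMapGetD rest k

-- 'for candidate in sorted_majors: if major >= candidate: chosen = candidate; else: break'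
def pvLoopA (cands : List Int) (major chosen : Int) : Int :=
  match cands with
  | [] => chosen
  | c :: rest => if major ≥ c then pvLoopA rest major c else chosen

def expected_versions_for_py (major : Option Int) : List (String × String) :=
  if kodiDbVersionMap.isEmpty then []
  else
    let sortedMajors := PySem.List.sorted (kodiDbVersionMap.map Prod.fst) (fun x => x) false
    -- sortedMajors is nonempty (the map is a nonempty constant), so the [-1]/[0] indexing is exact
    match major with
    | none => kodiMapGetD kodiDbVersionMap ((PySem.List.pyGet? sortedMajors (-1)).getD 0)
    | some m =>
      let chosen0 := (PySem.List.pyGet? sortedMajors 0).getD 0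
      let chosen1 := pvLoopA sortedMajors m chosen0
      let last := (PySem.List.pyGet? sortedMajors (-1)).getD 0
      kodiMapGetD kodiDbVersionMap (if m ≥ last then last else chosen1)

-- ===== PORT B =====
-- hand-written bisect_right: 'while lo < hi: mid = (lo+hi)//2; …'
def pvBisect (xs : List Int) (major : Int) (lo hi : Nat) : Nat :=
  if h : lo < hi then
    let mid := (lo + hi) / 2
    if (PySem.List.pyGet? xs (mid : Int)).getD 0 ≤ major then pvBisect xs major (mid + 1) hi
    else pvBisect xs major lo mid
  else lo
termination_by hi - lo
decreasing_by all_goals omega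

def expected_versions_for_py_alt (major : Option Int) : List (String × String) :=
  if kodiDbVersionMap.isEmpty then []
  else
    let sortedMajors := PySem.List.sorted (kodiDbVersionMap.map Prod.fst) (fun x => x) false
    match major with
    | none => kodiMapGetD kodiDbVersionMap ((PySem.List.pyGet? sortedMajors (-1)).getD 0)
    | some m =>
      let lo := pvBisect sortedMajors m 0 sortedMajors.length
      kodiMapGetD kodiDbVersionMap
        ((PySem.List.pyGet? sortedMajors (max ((lo : Int) - 1) 0)).getD 0)

-- ===== PRECONDITION & SPEC =====
def Spec_expected_versions_for_py (major : Option Int) (out : List (String × String)) : Prop := out = expected_versions_for_py_alt major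
instance (major : Option Int) (out : List (String × String)) : Decidable (Spec_expected_versions_for_py major out) := by unfold Spec_expected_versions_for_py; infer_instance

-- ===== CLAIM (what is proved, stated in full; the proofs are below) =====
def Claim_equal_expected_versions_for_py : Prop := ∀ (major : Option Int), Dom_expected_versions_for_py major → Spec_expected_versions_for_py major (expected_versions_for_py major)

-- ===== LEMMAS AND PROOFS =====

theorem pv_none_case : expected_versions_for_py none = expected_versions_for_py_alt none := by decide

theorem pv_some_case (m : Int) :
    expected_versions_for_py (some m) = expected_versions_for_py_alt (some m) := by
  have hs : PySem.List.sorted (([21, 20, 19, 18, 17] : List Int)) (fun x => x) false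
      = [17, 18, 19, 20, 21] := by decide
  by_cases h21 : 21 ≤ m
  · simp [expected_versions_for_py, expected_versions_for_py_alt, hs, pvLoopA, pvBisect,
      kodiDbVersionMap, kodiMapGetD, h21, show (17:Int) ≤ m by omega, show (18:Int) ≤ m by omega,
      show (19:Int) ≤ m by omega, show (20:Int) ≤ m by omega, PySem.List.pyGet?, PySem.List.pyIdx?]
  · by_cases h20 : 20 ≤ m
    · simp [expected_versions_for_py, expected_versions_for_py_alt, hs, pvLoopA, pvBisect,
        kodiDbVersionMap, kodiMapGetD, h20, h21, show (17:Int) ≤ m by omega,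
        show (18:Int) ≤ m by omega, show (19:Int) ≤ m by omega, PySem.List.pyGet?, PySem.List.pyIdx?]
    · by_cases h19 : 19 ≤ m
      · simp [expected_versions_for_py, expected_versions_for_py_alt, hs, pvLoopA, pvBisect,
          kodiDbVersionMap, kodiMapGetD, h19, h20, h21, show (17:Int) ≤ m by omega,
          show (18:Int) ≤ m by omega, PySem.List.pyGet?, PySem.List.pyIdx?]
      · by_cases h18 : 18 ≤ m
        · simp [expected_versions_for_py, expected_versions_for_py_alt, hs, pvLoopA, pvBisect,
            kodiDbVersionMap, kodiMapGetD, h18, h19, h20, h21,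
            show (17:Int) ≤ m by omega, PySem.List.pyGet?, PySem.List.pyIdx?]
        · by_cases h17 : 17 ≤ m
          · simp [expected_versions_for_py, expected_versions_for_py_alt, hs, pvLoopA, pvBisect,
              kodiDbVersionMap, kodiMapGetD, h17, h18, h19, h20, h21, PySem.List.pyGet?, PySem.List.pyIdx?]
          · simp [expected_versions_for_py, expected_versions_for_py_alt, hs, pvLoopA, pvBisect,
              kodiDbVersionMap, kodiMapGetD, h17, h18, h19, h20, h21, PySem.List.pyGet?, PySem.List.pyIdx?]

-- ===== VERDICT (by name: the statement is the Claim_ definition above) =====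
theorem expected_versions_for_py_spec : Claim_equal_expected_versions_for_py := by
  intro major _
  unfold Spec_expected_versions_for_py
  cases major with
  | none => exact pv_none_case
  | some m => exact pv_some_case m
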